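-- pv_equiv track=rewrite | github.com/bayrktlihn/python_examples | examples_three/quest_08.py | shout
-- ===== SOURCE A (Python) =====
-- def fix_text(text):
--     text = text.split(" ")
--     text = [word for word in text if word != ""]
--     return " ".join(text)
--
-- def shout(text):
--     result = ""
--     text = fix_text(text).upper()
--     for letter in text:
--         if letter == " ":
--             result += letter
--         else:
--             result += letter + " "
--     result += "!"
--
--     return result
-- ===== SOURCE B (Python) =====
-- def shout(text):
--     words = [w for w in text.split(" ") if w != ""]
--     spaced = [''.join(ch + ' ' for ch in w.upper()) for w in words]
--     return ' '.join(spaced) + '!'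
-- ===== Notes on version B (the rewrite author's own statement) =====
-- stated objective: simpler
-- what changed: B drops the flat character loop with its space/non-space branch and the fix_text pre-join: it splits once into non-empty words, spaces each uppercased word's letters with a join, joins the spaced words with a single space, and appends the exclamation mark.
import Mathlib
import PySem

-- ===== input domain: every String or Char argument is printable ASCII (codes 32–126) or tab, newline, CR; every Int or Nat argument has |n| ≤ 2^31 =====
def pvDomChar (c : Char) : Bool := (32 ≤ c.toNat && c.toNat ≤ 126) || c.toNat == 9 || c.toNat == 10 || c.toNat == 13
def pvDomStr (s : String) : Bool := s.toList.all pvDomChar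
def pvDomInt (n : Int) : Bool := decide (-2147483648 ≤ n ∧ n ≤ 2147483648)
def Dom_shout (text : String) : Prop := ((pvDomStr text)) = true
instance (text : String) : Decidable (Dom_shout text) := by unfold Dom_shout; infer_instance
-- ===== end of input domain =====

-- B replaces A's flat char loop (space/non-space branch) and fix_text pre-join by a
-- words-then-letters decomposition: space each uppercased word, join words with a single space, append the exclamation mark. (simpler)

-- ===== PORT A =====
-- fix_text: split on " ", drop empty words, re-join with " "
def fixText (text : String) : List Char :=
  PySem.Chars.join [' '] ((PySem.Chars.splitOn text.toList [' ']).filter (fun w => w ≠ []))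

def shout (text : String) : String :=
  let t := PySem.Chars.upper (fixText text)
  let result := t.foldl (fun r c => if c = ' ' then r ++ [c] else r ++ ([c] ++ [' '])) []
  String.mk (result ++ ['!'])

-- ===== PORT B =====
def shout_alt (text : String) : String :=
  let words := (PySem.Chars.splitOn text.toList [' ']).filter (fun w => w ≠ [])
  let spaced := words.map (fun w => PySem.Chars.join [] ((PySem.Chars.upper w).map (fun c => [c] ++ [' '])))
  String.mk (PySem.Chars.join [' '] spaced ++ ['!'])

-- ===== PRECONDITION & SPEC =====
def Spec_shout (text : String) (out : String) : Prop := out = shout_alt text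
instance (text : String) (out : String) : Decidable (Spec_shout text out) := by unfold Spec_shout; infer_instance

-- ===== CLAIM (what is proved, stated in full; the proofs are below) =====
def Claim_equal_shout : Prop := ∀ (text : String), Dom_shout text → Spec_shout text (shout text)

-- ===== LEMMAS AND PROOFS =====

-- every piece produced by splitOn on [' '] is free of ' '
theorem splitOn_go_nospace (fuel : Nat) : ∀ (l cur : List Char) (acc : List (List Char)),
    l.length < fuel → (' ' ∉ cur) → (∀ w ∈ acc, ' ' ∉ w) →
    ∀ w ∈ PySem.Chars.splitOn.go [' '] fuel l cur acc, ' ' ∉ w := by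
  induction fuel with
  | zero => intro l cur acc h; exact absurd h (Nat.not_lt_zero _)
  | succ n ih =>
    intro l cur acc hlen hcur hacc w hw
    cases l with
    | nil =>
      simp only [PySem.Chars.splitOn.go, List.mem_reverse, List.mem_cons] at hw
      rcases hw with h | h
      · subst h; simpa using hcur
      · exact hacc _ h
    | cons c rest =>
      simp only [PySem.Chars.splitOn.go] at hw
      by_cases hc : c = ' '
      · rw [if_pos (by simp [List.isPrefixOf, hc])] at hw
        refine ih _ _ _ (by simp at hlen ⊢; omega) (by simp) ?_ _ hw
        intro v hv
        rcases List.mem_cons.mp hv with h | h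
        · subst h; simpa using hcur
        · exact hacc _ h
      · rw [if_neg (by simp [List.isPrefixOf]; exact fun h => hc h.symm)] at hw
        refine ih _ _ _ (by simp at hlen ⊢; omega) ?_ hacc _ hw
        intro h
        rcases List.mem_cons.mp h with h | h
        · exact hc h.symm
        · exact hcur h

theorem splitOn_nospace (s : List Char) :
    ∀ w ∈ PySem.Chars.splitOn s [' '], ' ' ∉ w := by
  unfold PySem.Chars.splitOn
  exact splitOn_go_nospace _ _ _ _ (by omega) (by simp) (by simp)

-- upperChar never produces a space from a non-space
theorem upperChar_ne_space {c : Char} (h : c ≠ ' ') : PySem.Chars.upperChar c ≠ ' ' := by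
  unfold PySem.Chars.upperChar PySem.Chars.islower
  split_ifs with hl
  · simp only [Bool.and_eq_true, decide_eq_true_eq] at hl
    have h1 : (97 : Nat) ≤ c.toNat := hl.1
    have h2 : c.toNat ≤ 122 := hl.2
    intro he
    have hv : (c.toNat - 32).isValidChar := Or.inl (by omega)
    have ht : (Char.ofNat (c.toNat - 32)).toNat = c.toNat - 32 := by
      rw [Char.ofNat, dif_pos hv]; exact Char.toNat_ofNatAux hv
    have : (Char.ofNat (c.toNat - 32)).toNat = (' ' : Char).toNat := by rw [he]
    rw [ht] at this
    have : c.toNat - 32 = 32 := this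
    omega
  · exact h

theorem upper_nospace {w : List Char} (h : ' ' ∉ w) : ' ' ∉ PySem.Chars.upper w := by
  unfold PySem.Chars.upper
  intro hm
  rcases List.mem_map.mp hm with ⟨c, hc, he⟩
  exact upperChar_ne_space (fun he' => h (he' ▸ hc)) he

-- upper distributes over the space-join
theorem upper_join (ws : List (List Char)) :
    PySem.Chars.upper (PySem.Chars.join [' '] ws) =
      PySem.Chars.join [' '] (ws.map PySem.Chars.upper) := by
  induction ws with
  | nil => simp [PySem.Chars.join_nil, PySem.Chars.upper]
  | cons w ws ih =>
    cases ws with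
    | nil => simp [PySem.Chars.join_singleton]
    | cons v vs =>
      rw [List.map_cons, List.map_cons, PySem.Chars.join_cons_cons,
        PySem.Chars.join_cons_cons, ← List.map_cons]
      simp only [PySem.Chars.upper] at ih ⊢
      rw [List.map_append, List.map_append, ih]
      rfl

-- ''.join of two-char pieces is flatMap
theorem join_nil_map (f : Char → List Char) (w : List Char) :
    PySem.Chars.join [] (w.map f) = w.flatMap f := by
  induction w with
  | nil => simp [PySem.Chars.join_nil]
  | cons c cs ih =>
    cases cs with
    | nil => simp [PySem.Chars.join_singleton]
    | cons d ds =>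
      rw [List.map_cons, List.map_cons, PySem.Chars.join_cons_cons, ← List.map_cons, ih]
      simp

-- A's character loop is a flatMap
theorem loop_eq_flatMap (t : List Char) :
    t.foldl (fun r c => if c = ' ' then r ++ [c] else r ++ ([c] ++ [' '])) [] =
      t.flatMap (fun c => if c = ' ' then [c] else [c, ' ']) := by
  have : (fun (r : List Char) (c : Char) => if c = ' ' then r ++ [c] else r ++ ([c] ++ [' '])) =
      (fun r c => r ++ (if c = ' ' then [c] else [c, ' '])) := by
    funext r c; split_ifs <;> simp
  rw [this]
  simpa using PySem.List.foldl_append_eq_flatMap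
    (fun c => if c = ' ' then [c] else [c, ' ']) t []

-- a space-free word flatMaps without the space branch firing
theorem flatMap_nospace {w : List Char} (h : ' ' ∉ w) :
    w.flatMap (fun c => if c = ' ' then [c] else [c, ' ']) =
      w.flatMap (fun c => [c] ++ [' ']) := by
  induction w with
  | nil => rfl
  | cons c cs ih =>
    have hc : c ≠ ' ' := by intro hc; exact h (by simp [hc])
    rw [List.flatMap_cons, List.flatMap_cons, ih (fun hm => h (List.mem_cons_of_mem _ hm)),
      if_neg hc]
    simp

-- the key decomposition: flatMapping the joined space-free words = joining the flatMapped words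
theorem flatMap_join (ws : List (List Char)) (h : ∀ w ∈ ws, ' ' ∉ w) :
    (PySem.Chars.join [' '] ws).flatMap (fun c => if c = ' ' then [c] else [c, ' ']) =
      PySem.Chars.join [' '] (ws.map (fun w => w.flatMap (fun c => [c] ++ [' ']))) := by
  induction ws with
  | nil => simp [PySem.Chars.join_nil]
  | cons w ws ih =>
    cases ws with
    | nil =>
      simp only [List.map_cons, List.map_nil, PySem.Chars.join_singleton]
      exact flatMap_nospace (h w (by simp))
    | cons v vs =>
      rw [PySem.Chars.join_cons_cons, List.flatMap_append, List.flatMap_append,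
        ih (fun u hu => h u (List.mem_cons_of_mem _ hu)),
        flatMap_nospace (h w (by simp))]
      simp only [List.map_cons, PySem.Chars.join_cons_cons]
      simp

-- ===== VERDICT (by name: the statement is the Claim_ definition above) =====
theorem shout_spec : Claim_equal_shout := by
  intro text _
  unfold Spec_shout shout shout_alt fixText
  set ws := (PySem.Chars.splitOn text.toList [' ']).filter (fun w => w ≠ []) with hws
  have hnos : ∀ w ∈ ws.map PySem.Chars.upper, ' ' ∉ w := by
    intro w hw
    rcases List.mem_map.mp hw with ⟨v, hv, he⟩
    exact he ▸ upper_nospace (splitOn_nospace _ _ (List.mem_of_mem_filter hv))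
  simp only [loop_eq_flatMap, upper_join, flatMap_join _ hnos, join_nil_map]
  rw [List.map_map]
  rfl
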